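-- pv_equiv track=rewrite | github.com/posl/comment_recommendation | script/mod_gen/5_time/en/128_C/8.py | on_off_combination
-- ===== SOURCE A (Python) =====
-- def on_off_combination(n,m,k,s,p):
--     # n: number of switches
--     # m: number of bulbs
--     # k: number of switches connected to bulb
--     # s: switches connected to bulb
--     # p: state of bulb
--     # return: number of combinations to turn on all bulbs
--     comb = []
--     for i in range(2**n):
--         switch = []
--         for j in range(n):
--             if (i>>j)&1:
--                 switch.append(1)
--             else:
--                 switch.append(0)
--         comb.append(switch)
--     count = 0
--     for c in comb:
--         bulb = []
--         for i in range(m):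
--             light = 0
--             for j in range(k[i]):
--                 light += c[s[i][j]-1]
--             bulb.append(light%2)
--         if bulb == p:
--             count += 1
--     return count
-- ===== SOURCE B (Python) =====
-- def on_off_combination(n, m, k, s, p):
--     # Invert the wiring once (bulb lists per switch), then enumerate switch
--     # settings by depth-first search, updating the bulb parity vector
--     # incrementally instead of recomputing it for every setting.
--     bulbs_of = [[] for _ in range(n)]
--     for i in range(m):
--         for j in range(k[i]):
--             bulbs_of[s[i][j] - 1].append(i)
--     def go(j, par):
--         if j == n:
--             return 1 if par == p else 0
--         total = go(j + 1, par)
--         flipped = list(par)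
--         for i in bulbs_of[j]:
--             flipped[i] = 1 - flipped[i]
--         return total + go(j + 1, flipped)
--     return go(0, [0] * m)
-- ===== Notes on version B (the rewrite author's own statement) =====
-- stated objective: alternative
-- what changed: Replaces A's materialisation of all 2**n assignment lists and the per-assignment per-bulb rescan of s/k by a DFS over switches that maintains the bulb parity vector incrementally via a precomputed transposed switch-to-bulbs incidence table, so each visited assignment costs O(m) instead of O(n + sum(k)).
import Mathlib
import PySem

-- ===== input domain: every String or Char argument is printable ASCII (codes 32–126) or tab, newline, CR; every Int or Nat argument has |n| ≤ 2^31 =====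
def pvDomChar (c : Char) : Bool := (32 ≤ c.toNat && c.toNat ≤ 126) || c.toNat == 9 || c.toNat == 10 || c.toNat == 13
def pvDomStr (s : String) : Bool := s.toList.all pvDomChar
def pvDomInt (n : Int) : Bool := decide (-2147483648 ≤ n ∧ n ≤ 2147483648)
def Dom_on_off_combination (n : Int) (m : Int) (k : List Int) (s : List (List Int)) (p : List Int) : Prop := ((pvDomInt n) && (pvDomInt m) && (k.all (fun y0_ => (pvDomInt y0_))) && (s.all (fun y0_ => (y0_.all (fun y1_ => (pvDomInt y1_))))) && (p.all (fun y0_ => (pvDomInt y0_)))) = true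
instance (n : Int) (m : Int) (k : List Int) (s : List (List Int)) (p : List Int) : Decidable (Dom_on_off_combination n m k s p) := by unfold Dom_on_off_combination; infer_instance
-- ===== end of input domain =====

-- B replaces A's materialise-all-2^n-assignments-and-rescan-every-bulb search by a DFS over the
-- switches with incremental parity updates through a transposed switch→bulbs incidence table;
-- equivalence is proved on Pre_, exactly the inputs where A returns.

-- ===== PORT A =====
-- '2**n' is ported as 2 ^ n.toNat (exact for n ≥ 0; Python raises for n < 0, outside Pre_);
-- '(i>>j)&1' as Nat shiftRight/land (i, j ≥ 0 on every reachable iteration);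
-- list indexing as pyGetD (exact under Pre_; Python raises exactly outside it).
def on_off_combination (n : Int) (m : Int) (k : List Int) (s : List (List Int)) (p : List Int) : Int :=
  let comb : List (List Int) :=
    (PySem.List.pyRange 0 ((2 : Int) ^ n.toNat) 1).foldl (fun comb i =>
      let switch : List Int :=
        (PySem.List.pyRange 0 n 1).foldl (fun switch j =>
          if (i.toNat >>> j.toNat) &&& 1 = 1 then switch ++ [(1 : Int)] else switch ++ [(0 : Int)]) []
      comb ++ [switch]) []
  comb.foldl (fun count c =>
    let bulb : List Int :=
      (PySem.List.pyRange 0 m 1).foldl (fun bulb i =>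
        let light : Int :=
          (PySem.List.pyRange 0 (PySem.List.pyGetD k i 0) 1).foldl (fun light j =>
            light + PySem.List.pyGetD c (PySem.List.pyGetD (PySem.List.pyGetD s i []) j 0 - 1) 0) 0
        bulb ++ [PySem.Int.mod light 2]) []
    if bulb = p then count + 1 else count) 0

-- ===== PORT B =====
-- the recursive 'go(j, par)' of Source B, transcribed as structural recursion over the suffix
-- bulbs_of[j:] of the incidence table ('j == n' is the [] case); 'flipped[i] = 1 - flipped[i]'
-- is pySetD/pyGetD (exact: every executed index is in range).
def pyOnOffGo (p : List Int) : List (List Int) → List Int → Int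
  | [], par => if par = p then 1 else 0
  | t :: rest, par =>
      let total := pyOnOffGo p rest par
      let flipped := t.foldl (fun pr i => PySem.List.pySetD pr i (1 - PySem.List.pyGetD pr i 0)) par
      total + pyOnOffGo p rest flipped

-- 'bulbs_of[s[i][j]-1].append(i)' is pyGetD/pySetD at index s[i][j]-1 (Python's list
-- indexing, including the negative-index rule, exact under Pre_); '[0]*m' is
-- List.replicate m.toNat 0 (both empty for m ≤ 0).
def on_off_combination_alt (n : Int) (m : Int) (k : List Int) (s : List (List Int)) (p : List Int) : Int :=
  let bulbs_of : List (List Int) :=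
    (PySem.List.pyRange 0 m 1).foldl (fun tg i =>
      (PySem.List.pyRange 0 (PySem.List.pyGetD k i 0) 1).foldl (fun tg j =>
        let w := PySem.List.pyGetD (PySem.List.pyGetD s i []) j 0 - 1
        PySem.List.pySetD tg w (PySem.List.pyGetD tg w [] ++ [i])) tg)
      (List.replicate n.toNat [])
  pyOnOffGo p bulbs_of (List.replicate m.toNat 0)

-- ===== PRECONDITION & SPEC =====
-- Pre_ is exactly the set of inputs where Python A returns normally: n ≥ 0 (2**n with n < 0 is a
-- float, so range() raises TypeError), k and s long enough for the m bulbs, each bulb's switch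
-- count within its row, and every referenced switch index in Python's list-index range [-n, n).
def Pre_on_off_combination (n : Int) (m : Int) (k : List Int) (s : List (List Int)) (p : List Int) : Prop :=
  0 ≤ n ∧ m ≤ (k.length : Int) ∧ m ≤ (s.length : Int) ∧
  ∀ q ∈ (k.take m.toNat).zip (s.take m.toNat),
    q.1 ≤ ((q.2 : List Int).length : Int) ∧ ∀ x ∈ q.2.take q.1.toNat, 1 - n ≤ x ∧ x ≤ n
instance (n : Int) (m : Int) (k : List Int) (s : List (List Int)) (p : List Int) : Decidable (Pre_on_off_combination n m k s p) := by unfold Pre_on_off_combination; infer_instance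

def pvWitness_on_off_combination : Int × Int × List Int × List (List Int) × List Int :=
  (2, 2, [1, 2], [[1], [1, 2]], [1, 0])

def Spec_on_off_combination (n : Int) (m : Int) (k : List Int) (s : List (List Int)) (p : List Int) (out : Int) : Prop := out = on_off_combination_alt n m k s p
instance (n : Int) (m : Int) (k : List Int) (s : List (List Int)) (p : List Int) (out : Int) : Decidable (Spec_on_off_combination n m k s p out) := by unfold Spec_on_off_combination; infer_instance

-- ===== CLAIM (what is proved, stated in full; the proofs are below) =====
def Claim_equal_on_off_combination : Prop := ∀ (n : Int) (m : Int) (k : List Int) (s : List (List Int)) (p : List Int), Dom_on_off_combination n m k s p → Pre_on_off_combination n m k s p → Spec_on_off_combination n m k s p (on_off_combination n m k s p)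

-- ===== LEMMAS AND PROOFS =====
-- proof-side helpers (used only by the lemmas below)

-- Python's wrapped list index (s[i][j]-1) reduced mod n, as a Nat
def pvWidx (n x : Int) : Nat := (PySem.Int.mod (x - 1) n).toNat

-- the switch indices (mod n) referenced by bulb q, with multiplicity
def pvRow (n : Int) (k : List Int) (s : List (List Int)) (q : Nat) : List Nat :=
  ((s.getD q []).take (k.getD q 0).toNat).map (pvWidx n)

-- assignment number i as A's 0/1 switch list
def pvSw (n : Int) (i : Nat) : List Int :=
  (List.range n.toNat).map (fun j => if (i >>> j) &&& 1 = 1 then (1 : Int) else 0)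

-- A's bulb vector for assignment c (the inner double loop of A, list-level form)
def pvBulb (n m : Int) (k : List Int) (s : List (List Int)) (c : List Int) : List Int :=
  (List.range m.toNat).map (fun q =>
    PySem.Int.mod (((s.getD q []).take (k.getD q 0).toNat).foldl
      (fun acc x => acc + PySem.List.pyGetD c (x - 1) 0) 0) 2)

-- B's one-switch parity flip (the 'flipped' loop of go)
def pvFlip (t : List Int) (par : List Int) : List Int :=
  t.foldl (fun pr i => PySem.List.pySetD pr i (1 - PySem.List.pyGetD pr i 0)) par

-- apply the incidence table along the binary digits of i
def pvApply : List (List Int) → Nat → List Int → List Int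
  | [], _, par => par
  | t :: rest, i, par => pvApply rest (i / 2) (if i % 2 = 1 then pvFlip t par else par)

-- how many flips position q receives when applying ts along the digits of i
def pvFlips : List (List Int) → Nat → Nat → Nat
  | [], _, _ => 0
  | t :: rest, i, q => (if i % 2 = 1 then t.count (q : Int) else 0) + pvFlips rest (i / 2) q

-- B's incidence table (the building fold of on_off_combination_alt, verbatim)
def pvTog (n m : Int) (k : List Int) (s : List (List Int)) : List (List Int) :=
  (PySem.List.pyRange 0 m 1).foldl (fun tg i =>
    (PySem.List.pyRange 0 (PySem.List.pyGetD k i 0) 1).foldl (fun tg j =>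
      let w := PySem.List.pyGetD (PySem.List.pyGetD s i []) j 0 - 1
      PySem.List.pySetD tg w (PySem.List.pyGetD tg w [] ++ [i])) tg)
    (List.replicate n.toNat [])

lemma pv_sum_range_two_mul (M : Nat) (f : Nat → Int) :
    ∑ i ∈ Finset.range (2 * M), f i = ∑ a ∈ Finset.range M, (f (2 * a) + f (2 * a + 1)) := by
  induction M with
  | zero => simp
  | succ M ih =>
    have h : 2 * (M + 1) = (2 * M + 1) + 1 := by ring
    rw [h, Finset.sum_range_succ, Finset.sum_range_succ, ih, Finset.sum_range_succ]
    ring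

lemma pv_go_sum (p : List Int) (ts : List (List Int)) (par : List Int) :
    pyOnOffGo p ts par =
      ∑ i ∈ Finset.range (2 ^ ts.length), (if pvApply ts i par = p then (1 : Int) else 0) := by
  induction ts generalizing par with
  | nil => simp [pyOnOffGo, pvApply]
  | cons t rest ih =>
    have hsplit : (2 : Nat) ^ (t :: rest).length = 2 * 2 ^ rest.length := by
      simp [List.length_cons, pow_succ]; ring
    rw [hsplit, pv_sum_range_two_mul]
    have he : ∀ a : Nat, pvApply (t :: rest) (2 * a) par = pvApply rest a par := by
      intro a
      have h1 : (2 * a) % 2 = 0 := by omega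
      have h2 : (2 * a) / 2 = a := by omega
      simp [pvApply, h1, h2]
    have ho : ∀ a : Nat, pvApply (t :: rest) (2 * a + 1) par = pvApply rest a (pvFlip t par) := by
      intro a
      have h1 : (2 * a + 1) % 2 = 1 := by omega
      have h2 : (2 * a + 1) / 2 = a := by omega
      simp [pvApply, h1, h2]
    have : pyOnOffGo p (t :: rest) par = pyOnOffGo p rest par + pyOnOffGo p rest (pvFlip t par) := by
      simp [pyOnOffGo, pvFlip]
    rw [this, ih, ih]
    rw [Finset.sum_add_distrib]
    congr 1
    · exact Finset.sum_congr rfl (fun a _ => by rw [he a])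
    · exact Finset.sum_congr rfl (fun a _ => by rw [ho a])

lemma pv_countP_range (M : Nat) (q : Nat → Bool) :
    (((List.range M).countP q : Nat) : Int) = ∑ i ∈ Finset.range M, (if q i then (1 : Int) else 0) := by
  induction M with
  | zero => simp
  | succ M ih =>
    rw [List.range_succ, List.countP_append, Finset.sum_range_succ, ← ih]
    push_cast [List.countP_cons]
    split <;> simp

lemma pv_foldl_pyRange_take {α β : Type} (xs : List α) (b : Int) (hb : b ≤ (xs.length : Int))
    (f : β → α → β) (d : α) (init : β) :
    (PySem.List.pyRange 0 b 1).foldl (fun acc j => f acc (PySem.List.pyGetD xs j d)) init =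
      (xs.take b.toNat).foldl f init := by
  rcases (by omega : b ≤ 0 ∨ 0 < b) with hb0 | hb0
  · rw [PySem.List.pyRange_one_eq_nil hb0]
    have : b.toNat = 0 := by omega
    simp [this]
  · set ys := xs.take b.toNat with hys
    have hlen : (ys.length : Int) = b := by
      simp [hys]; omega
    have hcongr : (PySem.List.pyRange 0 b 1).foldl
        (fun acc j => f acc (PySem.List.pyGetD xs j d)) init =
        (PySem.List.pyRange 0 b 1).foldl
        (fun acc j => f acc (PySem.List.pyGetD ys j d)) init := by
      apply PySem.List.foldl_congr_mem
      intro acc j hj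
      rw [PySem.List.mem_pyRange_one] at hj
      have h1 : j < (ys.length : Int) := by omega
      have h2 : j < (xs.length : Int) := by omega
      rw [PySem.List.pyGetD_eq_getElem xs d hj.1 h2,
        PySem.List.pyGetD_eq_getElem ys d hj.1 h1]
      congr 1
      simp [hys]
    rw [hcongr, ← hlen]
    exact PySem.List.foldl_pyRange_zero_pyGetD' ys d f init

-- Pre_ row facts for a bulb index q < m.toNat
lemma pv_pre_row (n m : Int) (k : List Int) (s : List (List Int)) (p : List Int)
    (hp : Pre_on_off_combination n m k s p) {q : Nat} (hq : q < m.toNat) :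
    q < k.length ∧ q < s.length ∧ (k.getD q 0) ≤ ((s.getD q []).length : Int) ∧
      ∀ x ∈ (s.getD q []).take (k.getD q 0).toNat, 1 - n ≤ x ∧ x ≤ n := by
  obtain ⟨hn, hk, hs, hrows⟩ := hp
  have hqk : q < k.length := by omega
  have hqs : q < s.length := by omega
  have hzq : q < ((k.take m.toNat).zip (s.take m.toNat)).length := by
    simp; omega
  have hmem : (k.getD q 0, s.getD q []) ∈ (k.take m.toNat).zip (s.take m.toNat) := by
    have hq1 : q < (k.take m.toNat).length := by simp; omega
    have hq2 : q < (s.take m.toNat).length := by simp; omega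
    have : ((k.take m.toNat).zip (s.take m.toNat))[q] = ((k.take m.toNat)[q], (s.take m.toNat)[q]) :=
      List.getElem_zip (h := hzq)
    rw [List.getElem_take, List.getElem_take] at this
    rw [List.getD_eq_getElem k 0 hqk, List.getD_eq_getElem s [] hqs]
    rw [← this]
    exact List.getElem_mem hzq
  have := hrows _ hmem
  exact ⟨hqk, hqs, this.1, this.2⟩

lemma pv_mod_facts (n x : Int) (hx : 1 - n ≤ x ∧ x ≤ n) :
    0 < n ∧ 0 ≤ PySem.Int.mod (x - 1) n ∧ PySem.Int.mod (x - 1) n < n := by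
  have hn : 0 < n := by omega
  rw [PySem.Int.mod_eq_emod_of_pos hn]
  exact ⟨hn, Int.emod_nonneg _ (by omega), Int.emod_lt_of_pos _ hn⟩

lemma pv_widx_lt (n x : Int) (hx : 1 - n ≤ x ∧ x ≤ n) : pvWidx n x < n.toNat := by
  obtain ⟨hn, h0, h1⟩ := pv_mod_facts n x hx
  unfold pvWidx
  omega

-- Python's c[x-1] (possibly negative index) is c at the wrapped position pvWidx n x
lemma pv_idx {α : Type} (n x : Int) (c : List α) (d : α)
    (hx : 1 - n ≤ x ∧ x ≤ n) (hc : c.length = n.toNat) :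
    PySem.List.pyGetD c (x - 1) d = c.getD (pvWidx n x) d := by
  obtain ⟨hn, h0, h1⟩ := pv_mod_facts n x hx
  have hnn : (n.toNat : Int) = n := by omega
  rcases (by omega : 0 ≤ x - 1 ∨ x - 1 < 0) with hpos | hneg
  · have hlt : x - 1 < (c.length : Int) := by omega
    rw [PySem.List.pyGetD_eq_getElem c d hpos hlt]
    have hmod : PySem.Int.mod (x - 1) n = x - 1 := by
      rw [PySem.Int.mod_eq_emod_of_pos hn]
      exact Int.emod_eq_of_lt hpos (by omega)
    have hidx : pvWidx n x = (x - 1).toNat := by unfold pvWidx; rw [hmod]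
    rw [hidx, List.getD_eq_getElem c d (by omega)]
  · set kk : Nat := (1 - x).toNat with hkk
    have hxk : x - 1 = -(kk : Int) := by omega
    have hk0 : 0 < kk := by omega
    have hkl : kk ≤ c.length := by omega
    rw [hxk, PySem.List.pyGetD_neg_natCast c kk d hk0 hkl]
    have hmod : PySem.Int.mod (x - 1) n = x - 1 + n := by
      rw [PySem.Int.mod_eq_emod_of_pos hn]
      have h3 : (x - 1 + n) % n = x - 1 + n := Int.emod_eq_of_lt (by omega) (by omega)
      have h2 : (x - 1 + n * 1) % n = (x - 1) % n := Int.add_mul_emod_self_left (x - 1) n 1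
      rw [mul_one] at h2
      rw [← h2, h3]
    have hidx : pvWidx n x = c.length - kk := by unfold pvWidx; rw [hmod]; omega
    rw [hidx, List.getD_eq_getElem c d (by omega)]

-- Python's c[x-1] = v assignment is set at the wrapped position pvWidx n x
lemma pv_setidx {α : Type} (n x : Int) (c : List α) (v : α)
    (hx : 1 - n ≤ x ∧ x ≤ n) (hc : c.length = n.toNat) :
    PySem.List.pySetD c (x - 1) v = c.set (pvWidx n x) v := by
  obtain ⟨hn, h0, h1⟩ := pv_mod_facts n x hx
  rcases (by omega : 0 ≤ x - 1 ∨ x - 1 < 0) with hpos | hneg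
  · rw [PySem.List.pySetD_of_nonneg c _ hpos]
    have hmod : PySem.Int.mod (x - 1) n = x - 1 := by
      rw [PySem.Int.mod_eq_emod_of_pos hn]
      exact Int.emod_eq_of_lt hpos (by omega)
    have hidx : pvWidx n x = (x - 1).toNat := by unfold pvWidx; rw [hmod]
    rw [hidx]
  · set kk : Nat := (1 - x).toNat with hkk
    have hxk : x - 1 = -(kk : Int) := by omega
    have hk0 : 0 < kk := by omega
    have hkl : kk ≤ c.length := by omega
    have hmod : PySem.Int.mod (x - 1) n = x - 1 + n := by
      rw [PySem.Int.mod_eq_emod_of_pos hn]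
      have h3 : (x - 1 + n) % n = x - 1 + n := Int.emod_eq_of_lt (by omega) (by omega)
      have h2 : (x - 1 + n * 1) % n = (x - 1) % n := Int.add_mul_emod_self_left (x - 1) n 1
      rw [mul_one] at h2
      rw [← h2, h3]
    have hidx : pvWidx n x = c.length - kk := by unfold pvWidx; rw [hmod]; omega
    rw [hidx, hxk]
    -- unfold pySetD/pySet?/pyIdx? on a negative in-range index
    simp only [PySem.List.pySetD, PySem.List.pySet?, PySem.List.pyIdx?]
    have hc1 : ¬ (0 : Int) ≤ -(kk : Int) := by omega
    have hc2 : -((c.length : Nat) : Int) ≤ -(kk : Int) := by omega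
    rw [if_neg hc1, if_pos hc2]
    simp

lemma pv_sw_getD (n : Int) (i w : Nat) (hw : w < n.toNat) :
    (pvSw n i).getD w 0 = if (i >>> w) &&& 1 = 1 then (1 : Int) else 0 := by
  have hlen : w < (pvSw n i).length := by simp [pvSw]; omega
  rw [List.getD_eq_getElem _ 0 hlen]
  simp [pvSw]

lemma pv_iterate_flip (c : Nat) :
    (fun x => (1 : Int) - x)^[c] 0 = if c % 2 = 1 then (1 : Int) else 0 := by
  induction c with
  | zero => simp
  | succ c ih =>
    rw [Function.iterate_succ_apply', ih]
    rcases Nat.mod_two_eq_zero_or_one c with h | h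
    · have h2 : (c + 1) % 2 = 1 := by omega
      simp [h, h2]
    · have h2 : (c + 1) % 2 = 0 := by omega
      simp [h, h2]

lemma pv_flip_spec (t par : List Int) (ht : ∀ y ∈ t, ∃ r : Nat, y = (r : Int) ∧ r < par.length) :
    (pvFlip t par).length = par.length ∧
      ∀ q : Nat, (pvFlip t par).getD q 0 = (fun x => (1 : Int) - x)^[t.count (q : Int)] (par.getD q 0) := by
  induction t generalizing par with
  | nil => simp [pvFlip]
  | cons y t ih =>
    obtain ⟨r, hyr, hr⟩ := ht y (List.mem_cons_self ..)
    have hstep : pvFlip (y :: t) par = pvFlip t (par.set r (1 - par.getD r 0)) := by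
      simp only [pvFlip, List.foldl_cons, hyr, PySem.List.pySetD_natCast, PySem.List.pyGetD_natCast]
    set par' := par.set r (1 - par.getD r 0) with hpar'
    have hlen' : par'.length = par.length := by simp [hpar']
    have ht' : ∀ y ∈ t, ∃ r : Nat, y = (r : Int) ∧ r < par'.length := by
      intro z hz
      obtain ⟨r2, h1, h2⟩ := ht z (List.mem_cons_of_mem _ hz)
      exact ⟨r2, h1, by omega⟩
    obtain ⟨ihlen, ihval⟩ := ih par' ht'
    refine ⟨by rw [hstep]; omega, fun q => ?_⟩
    rw [hstep, ihval q]
    by_cases hq : r = q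
    · subst hq
      have hget : par'.getD r 0 = 1 - par.getD r 0 := by
        simp [hpar', List.getD_eq_getElem?_getD, hr]
      rw [hget]
      have hcnt : (y :: t).count (r : Int) = t.count (r : Int) + 1 := by
        simp [hyr]
      rw [hcnt, Function.iterate_succ_apply]
    · have hget : par'.getD q 0 = par.getD q 0 := by
        simp [hpar', List.getD_eq_getElem?_getD, List.getElem?_set_ne hq]
      have hcnt : (y :: t).count (q : Int) = t.count (q : Int) := by
        simp [List.count_cons, hyr]
        omega
      rw [hget, hcnt]

lemma pv_apply_spec (ts : List (List Int)) (i : Nat) (par : List Int)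
    (hts : ∀ t ∈ ts, ∀ y ∈ t, ∃ r : Nat, y = (r : Int) ∧ r < par.length) :
    (pvApply ts i par).length = par.length ∧
      ∀ q : Nat, (pvApply ts i par).getD q 0 = (fun x => (1 : Int) - x)^[pvFlips ts i q] (par.getD q 0) := by
  induction ts generalizing par i with
  | nil => simp [pvApply, pvFlips]
  | cons t rest ih =>
    have hthead := hts t (List.mem_cons_self ..)
    obtain ⟨hflen, hfval⟩ := pv_flip_spec t par hthead
    set par' := if i % 2 = 1 then pvFlip t par else par with hpar'
    have hlen' : par'.length = par.length := by
      rw [hpar']; split <;> simp [hflen]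
    have hts' : ∀ t' ∈ rest, ∀ y ∈ t', ∃ r : Nat, y = (r : Int) ∧ r < par'.length := by
      intro t' ht' y hy
      obtain ⟨r, h1, h2⟩ := hts t' (List.mem_cons_of_mem _ ht') y hy
      exact ⟨r, h1, by omega⟩
    obtain ⟨ihlen, ihval⟩ := ih (i / 2) par' hts'
    have hstep : pvApply (t :: rest) i par = pvApply rest (i / 2) par' := by
      simp [pvApply, hpar']
    refine ⟨by rw [hstep]; omega, fun q => ?_⟩
    rw [hstep, ihval q]
    have hhead : par'.getD q 0 =
        (fun x => (1 : Int) - x)^[if i % 2 = 1 then t.count (q : Int) else 0] (par.getD q 0) := by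
      rw [hpar']
      split
      · exact hfval q
      · simp
    rw [hhead, ← Function.iterate_add_apply]
    have : pvFlips (t :: rest) i q =
        pvFlips rest (i / 2) q + (if i % 2 = 1 then t.count (q : Int) else 0) := by
      simp [pvFlips]; ring
    rw [this]

lemma pv_flips_sum (ts : List (List Int)) (i q : Nat) :
    pvFlips ts i q =
      ∑ j ∈ Finset.range ts.length, (if (i >>> j) &&& 1 = 1 then (ts.getD j []).count (q : Int) else 0) := by
  induction ts generalizing i with
  | nil => simp [pvFlips]
  | cons t rest ih =>
    rw [List.length_cons, Finset.sum_range_succ']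
    have h0 : (if (i >>> 0) &&& 1 = 1 then ((t :: rest).getD 0 []).count (q : Int) else 0) =
        (if i % 2 = 1 then t.count (q : Int) else 0) := by
      rw [Nat.shiftRight_zero, Nat.and_one_is_mod]
      rfl
    have hsucc : ∀ j : Nat, (i >>> (j + 1)) = (i / 2) >>> j := by
      intro j
      rw [← Nat.shiftRight_one i, ← Nat.shiftRight_add, Nat.add_comm]
    have hstep : ∀ j ∈ Finset.range rest.length,
        (if (i >>> (j + 1)) &&& 1 = 1 then ((t :: rest).getD (j + 1) []).count (q : Int) else 0) =
        (if ((i / 2) >>> j) &&& 1 = 1 then (rest.getD j []).count (q : Int) else 0) := by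
      intro j _
      rw [hsucc j]
      rfl
    rw [Finset.sum_congr rfl hstep, ← ih (i / 2), h0]
    simp [pvFlips]
    ring

lemma pv_countP_group (N : Nat) (l : List Nat) (hl : ∀ w ∈ l, w < N) (i : Nat) :
    l.countP (fun w => (i >>> w) &&& 1 == 1) =
      ∑ j ∈ Finset.range N, (if (i >>> j) &&& 1 = 1 then l.count j else 0) := by
  induction l with
  | nil => simp
  | cons w l ih =>
    have hw : w < N := hl w (List.mem_cons_self ..)
    have hl' : ∀ x ∈ l, x < N := fun x hx => hl x (List.mem_cons_of_mem _ hx)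
    have hsplit : ∀ j ∈ Finset.range N,
        (if (i >>> j) &&& 1 = 1 then (w :: l).count j else 0) =
        (if (i >>> j) &&& 1 = 1 then l.count j else 0) +
          (if j = w then (if (i >>> w) &&& 1 = 1 then 1 else 0) else 0) := by
      intro j _
      by_cases hj : j = w
      · subst hj
        split_ifs with hbb <;> simp_all
      · have : (w :: l).count j = l.count j := by
          simp [List.count_cons]
          omega
        simp [this, hj]
    rw [Finset.sum_congr rfl hsplit, Finset.sum_add_distrib, ← ih hl',
      Finset.sum_ite_eq' (Finset.range N) w]
    simp [List.countP_cons, hw]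

-- one inner append step of the incidence-building loop (B's code, with x = s[i][j])
def pvStep (n ii : Int) (tg : List (List Int)) (x : Int) : List (List Int) :=
  PySem.List.pySetD tg (x - 1) (PySem.List.pyGetD tg (x - 1) [] ++ [ii])

lemma pv_set_getD {α : Type} (l : List α) (r j : Nat) (v d : α) (hr : r < l.length) :
    (l.set r v).getD j d = if j = r then v else l.getD j d := by
  by_cases hj : j = r
  · subst hj
    simp [List.getD_eq_getElem?_getD, hr]
  · simp only [List.getD_eq_getElem?_getD, List.getElem?_set]
    rw [if_neg (by omega : ¬ r = j), if_neg hj]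

-- processing one bulb's row appends that bulb index to the incidence list of each referenced switch
lemma pv_tog_step (n : Int) (i0 : Nat) (row : List Int) (tg : List (List Int))
    (hrow : ∀ x ∈ row, 1 - n ≤ x ∧ x ≤ n) (hlen : tg.length = n.toNat) :
    (row.foldl (pvStep n (i0 : Int)) tg).length = n.toNat ∧
      (∀ j : Nat, ∀ y ∈ (row.foldl (pvStep n (i0 : Int)) tg).getD j [],
        y ∈ tg.getD j [] ∨ y = (i0 : Int)) ∧
      (∀ j q : Nat, ((row.foldl (pvStep n (i0 : Int)) tg).getD j []).count (q : Int) =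
        (tg.getD j []).count (q : Int) +
          if q = i0 then (row.map (pvWidx n)).count j else 0) := by
  induction row generalizing tg with
  | nil => exact ⟨hlen, fun j y hy => Or.inl hy, by simp⟩
  | cons x row ih =>
    have hx := hrow x (List.mem_cons_self ..)
    obtain ⟨hn, h0, h1⟩ := pv_mod_facts n x hx
    have hwlt : pvWidx n x < tg.length := by rw [hlen]; exact pv_widx_lt n x hx
    have htg1 : pvStep n (i0 : Int) tg x = tg.set (pvWidx n x) (tg.getD (pvWidx n x) [] ++ [(i0 : Int)]) := by
      unfold pvStep
      rw [pv_setidx n x tg _ hx hlen, pv_idx n x tg [] hx hlen]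
    set tg1 := tg.set (pvWidx n x) (tg.getD (pvWidx n x) [] ++ [(i0 : Int)]) with htg1d
    have hlen1 : tg1.length = n.toNat := by simp [htg1d]; omega
    have hget1 : ∀ j : Nat, tg1.getD j [] =
        if j = pvWidx n x then tg.getD (pvWidx n x) [] ++ [(i0 : Int)] else tg.getD j [] :=
      fun j => pv_set_getD tg (pvWidx n x) j _ [] hwlt
    have hrow' : ∀ x' ∈ row, 1 - n ≤ x' ∧ x' ≤ n := fun x' hx' => hrow x' (List.mem_cons_of_mem _ hx')
    obtain ⟨ihlen, ihmem, ihcnt⟩ := ih tg1 hrow' hlen1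
    have hfold : (x :: row).foldl (pvStep n (i0 : Int)) tg = row.foldl (pvStep n (i0 : Int)) tg1 := by
      rw [List.foldl_cons, htg1]
    refine ⟨by rw [hfold]; exact ihlen, ?_, ?_⟩
    · intro j y hy
      rw [hfold] at hy
      rcases ihmem j y hy with hmem | hmem
      · rw [hget1 j] at hmem
        by_cases hj : j = pvWidx n x
        · rw [if_pos hj] at hmem
          rcases List.mem_append.mp hmem with h | h
          · left; rw [hj]; exact h
          · right; simpa using h
        · rw [if_neg hj] at hmem
          left; exact hmem
      · right; exact hmem
    · intro j q
      rw [hfold, ihcnt j q, hget1 j]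
      by_cases hj : j = pvWidx n x
      · rw [if_pos hj, List.count_append, hj]
        have hsing : ([(i0 : Int)].count (q : Int)) = if q = i0 then 1 else 0 := by
          simp only [List.count_singleton]
          split_ifs <;> simp_all
        have hmapc : ((x :: row).map (pvWidx n)).count (pvWidx n x) =
            (row.map (pvWidx n)).count (pvWidx n x) + 1 := by
          simp
        rw [hsing, hmapc]
        split_ifs <;> omega
      · rw [if_neg hj]
        have hmapc : ((x :: row).map (pvWidx n)).count j = (row.map (pvWidx n)).count j := by
          simp [List.count_cons]
          omega
        rw [hmapc]

-- characterization of B's incidence table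
lemma pv_tog_spec (n m : Int) (k : List Int) (s : List (List Int)) (p : List Int)
    (hp : Pre_on_off_combination n m k s p) :
    (pvTog n m k s).length = n.toNat ∧
      (∀ t ∈ pvTog n m k s, ∀ y ∈ t, ∃ r : Nat, y = (r : Int) ∧ r < m.toNat) ∧
      ∀ j q : Nat, ((pvTog n m k s).getD j []).count (q : Int) =
        if q < m.toNat then (pvRow n k s q).count j else 0 := by
  have houter : pvTog n m k s = (List.range m.toNat).foldl
      (fun tg i0 => ((s.getD i0 []).take (k.getD i0 0).toNat).foldl (pvStep n (i0 : Int)) tg)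
      (List.replicate n.toNat []) := by
    unfold pvTog
    have hm : PySem.List.pyRange 0 m 1 = PySem.List.pyRange 0 ((m.toNat : Nat) : Int) 1 := by
      rcases (by omega : m ≤ 0 ∨ 0 < m) with h | h
      · rw [PySem.List.pyRange_one_eq_nil h, PySem.List.pyRange_one_eq_nil (by omega)]
      · congr 1; omega
    rw [hm, PySem.List.pyRange_zero_nat, List.foldl_map]
    apply PySem.List.foldl_congr_mem
    intro tg i0 hi0
    rw [List.mem_range] at hi0
    have hrowf := pv_pre_row n m k s p hp hi0
    simp only [PySem.List.pyGetD_natCast]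
    exact pv_foldl_pyRange_take (s.getD i0 []) (k.getD i0 0) hrowf.2.2.1 (pvStep n (i0 : Int)) 0 tg
  have hinv : ∀ mt' : Nat, mt' ≤ m.toNat →
      ((List.range mt').foldl
        (fun tg i0 => ((s.getD i0 []).take (k.getD i0 0).toNat).foldl (pvStep n (i0 : Int)) tg)
        (List.replicate n.toNat [])).length = n.toNat ∧
      (∀ j : Nat, ∀ y ∈ ((List.range mt').foldl
        (fun tg i0 => ((s.getD i0 []).take (k.getD i0 0).toNat).foldl (pvStep n (i0 : Int)) tg)
        (List.replicate n.toNat [])).getD j [], ∃ r : Nat, y = (r : Int) ∧ r < mt') ∧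
      (∀ j q : Nat, (((List.range mt').foldl
        (fun tg i0 => ((s.getD i0 []).take (k.getD i0 0).toNat).foldl (pvStep n (i0 : Int)) tg)
        (List.replicate n.toNat [])).getD j []).count (q : Int) =
        if q < mt' then (pvRow n k s q).count j else 0) := by
    intro mt' hmt'
    induction mt' with
    | zero =>
      simp only [List.range_zero, List.foldl_nil]
      have hrep : ∀ j : Nat, (List.replicate n.toNat ([] : List Int)).getD j [] = [] := by
        intro j
        rcases Nat.lt_or_ge j n.toNat with hj | hj
        · rw [List.getD_eq_getElem _ _ (by simpa using hj)]; simp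
        · exact List.getD_eq_default _ _ (by simpa using hj)
      refine ⟨by simp, ?_, ?_⟩
      · intro j y hy
        rw [hrep j] at hy
        simp at hy
      · intro j q
        rw [hrep j]
        simp
    | succ mt' ih =>
      obtain ⟨plen, pmem, pcnt⟩ := ih (by omega)
      rw [List.range_succ, List.foldl_append, List.foldl_cons, List.foldl_nil]
      have hrowf := pv_pre_row n m k s p hp (by omega : mt' < m.toNat)
      obtain ⟨slen, smem, scnt⟩ := pv_tog_step n mt'
        ((s.getD mt' []).take (k.getD mt' 0).toNat) _ hrowf.2.2.2 plen
      refine ⟨slen, ?_, ?_⟩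
      · intro j y hy
        rcases smem j y hy with h | h
        · obtain ⟨r, h1, h2⟩ := pmem j y h
          exact ⟨r, h1, by omega⟩
        · exact ⟨mt', h, by omega⟩
      · intro j q
        rw [scnt j q, pcnt j q]
        have : ((s.getD mt' []).take (k.getD mt' 0).toNat).map (pvWidx n) = pvRow n k s mt' := rfl
        rw [this]
        by_cases h1 : q < mt'
        · rw [if_pos h1, if_neg (by omega), if_pos (by omega)]
          omega
        · by_cases h2 : q = mt'
          · subst h2
            rw [if_neg h1, if_pos rfl, if_pos (by omega)]
            omega
          · rw [if_neg h1, if_neg h2, if_neg (by omega)]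
  obtain ⟨flen, fmem, fcnt⟩ := hinv m.toNat le_rfl
  rw [houter]
  refine ⟨flen, ?_, fcnt⟩
  intro t ht y hy
  obtain ⟨j, hj, hjt⟩ := List.mem_iff_getElem.mp ht
  have : _ = t := hjt
  apply fmem j y
  rw [List.getD_eq_getElem _ _ hj, this]
  exact hy

-- A's port as a sum over assignment numbers
lemma pv_A_sum (n m : Int) (k : List Int) (s : List (List Int)) (p : List Int)
    (hp : Pre_on_off_combination n m k s p) :
    on_off_combination n m k s p =
      ∑ i ∈ Finset.range (2 ^ n.toNat), (if pvBulb n m k s (pvSw n i) = p then (1 : Int) else 0) := by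
  have hswitch : ∀ iN : Nat,
      (PySem.List.pyRange 0 n 1).foldl (fun switch j =>
        if ((iN : Int).toNat >>> j.toNat) &&& 1 = 1 then switch ++ [(1 : Int)] else switch ++ [(0 : Int)]) []
      = pvSw n iN := by
    intro iN
    have hbody : (fun (switch : List Int) (j : Int) =>
        if ((iN : Int).toNat >>> j.toNat) &&& 1 = 1 then switch ++ [(1 : Int)] else switch ++ [(0 : Int)])
        = fun switch j => switch ++ [if ((iN : Int).toNat >>> j.toNat) &&& 1 = 1 then (1 : Int) else 0] := by
      funext sw j
      split <;> simp_all
    rw [hbody, PySem.List.foldl_append_singleton_eq_map, PySem.List.pyRange_one, List.map_map]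
    unfold pvSw
    simp
  have hbulb : ∀ c : List Int,
      (PySem.List.pyRange 0 m 1).foldl (fun bulb i =>
        bulb ++ [PySem.Int.mod ((PySem.List.pyRange 0 (PySem.List.pyGetD k i 0) 1).foldl
          (fun light j => light + PySem.List.pyGetD c (PySem.List.pyGetD (PySem.List.pyGetD s i []) j 0 - 1) 0) 0) 2]) []
      = pvBulb n m k s c := by
    intro c
    rw [PySem.List.foldl_append_singleton_eq_map, List.nil_append, PySem.List.pyRange_one,
      List.map_map, sub_zero]
    unfold pvBulb
    apply List.map_congr_left
    intro q hq
    rw [List.mem_range] at hq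
    simp only [Function.comp_apply, zero_add, PySem.List.pyGetD_natCast]
    congr 1
    exact pv_foldl_pyRange_take (s.getD q []) (k.getD q 0) (pv_pre_row n m k s p hp hq).2.2.1
      (fun acc x => acc + PySem.List.pyGetD c (x - 1) 0) 0 0
  have hA : on_off_combination n m k s p =
      ((PySem.List.pyRange 0 ((2 : Int) ^ n.toNat) 1).foldl (fun comb i =>
        comb ++ [(PySem.List.pyRange 0 n 1).foldl (fun switch j =>
          if (i.toNat >>> j.toNat) &&& 1 = 1 then switch ++ [(1 : Int)] else switch ++ [(0 : Int)]) []]) []).foldl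
        (fun count c =>
          if ((PySem.List.pyRange 0 m 1).foldl (fun bulb i =>
              bulb ++ [PySem.Int.mod ((PySem.List.pyRange 0 (PySem.List.pyGetD k i 0) 1).foldl
                (fun light j => light + PySem.List.pyGetD c (PySem.List.pyGetD (PySem.List.pyGetD s i []) j 0 - 1) 0) 0) 2]) []) = p
          then count + 1 else count) 0 := rfl
  rw [hA, PySem.List.foldl_append_singleton_eq_map, List.nil_append]
  have hpow : ((2 : Int) ^ n.toNat) = (((2 ^ n.toNat : Nat)) : Int) := by push_cast; ring
  rw [hpow, PySem.List.pyRange_zero_nat, List.map_map]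
  have hmapsw : ((fun i : Int => (PySem.List.pyRange 0 n 1).foldl (fun switch j =>
      if (i.toNat >>> j.toNat) &&& 1 = 1 then switch ++ [(1 : Int)] else switch ++ [(0 : Int)]) []) ∘
        (fun kk : Nat => (kk : Int)))
      = fun iN : Nat => pvSw n iN := by
    funext iN
    exact hswitch iN
  rw [hmapsw, List.foldl_map]
  have hbody2 : (fun (count : Int) (iN : Nat) =>
      if ((PySem.List.pyRange 0 m 1).foldl (fun bulb i =>
          bulb ++ [PySem.Int.mod ((PySem.List.pyRange 0 (PySem.List.pyGetD k i 0) 1).foldl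
            (fun light j => light + PySem.List.pyGetD (pvSw n iN) (PySem.List.pyGetD (PySem.List.pyGetD s i []) j 0 - 1) 0) 0) 2]) []) = p
        then count + 1 else count)
      = fun (count : Int) (iN : Nat) => if pvBulb n m k s (pvSw n iN) = p then count + 1 else count := by
    funext count iN
    rw [hbulb (pvSw n iN)]
  rw [hbody2, PySem.List.foldl_ite_add_one (fun iN : Nat => pvBulb n m k s (pvSw n iN) = p), zero_add,
    pv_countP_range]
  refine Finset.sum_congr rfl (fun i _ => ?_)
  simp only [decide_eq_true_eq]

-- the pointwise bridge: A's bulb vector is B's incrementally flipped parity vector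
lemma pv_bulb_eq_apply (n m : Int) (k : List Int) (s : List (List Int)) (p : List Int)
    (hp : Pre_on_off_combination n m k s p) (i : Nat) :
    pvBulb n m k s (pvSw n i) = pvApply (pvTog n m k s) i (List.replicate m.toNat 0) := by
  obtain ⟨hlen, hmem, hcnt⟩ := pv_tog_spec n m k s p hp
  have hts : ∀ t ∈ pvTog n m k s, ∀ y ∈ t, ∃ r : Nat,
      y = (r : Int) ∧ r < (List.replicate m.toNat (0 : Int)).length := by
    intro t ht y hy
    obtain ⟨r, h1, h2⟩ := hmem t ht y hy
    exact ⟨r, h1, by simpa using h2⟩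
  obtain ⟨alen, aval⟩ := pv_apply_spec (pvTog n m k s) i (List.replicate m.toNat 0) hts
  have hblen : (pvBulb n m k s (pvSw n i)).length = m.toNat := by simp [pvBulb]
  apply List.ext_getElem (by rw [hblen, alen]; simp)
  intro q hq hq2
  have hqm : q < m.toNat := by rwa [hblen] at hq
  obtain ⟨hkq, hsq, hbq, hxq⟩ := pv_pre_row n m k s p hp hqm
  -- left side: A's bulb entry
  have hswlen : (pvSw n i).length = n.toNat := by simp [pvSw]
  have hfold : ((s.getD q []).take (k.getD q 0).toNat).foldl
      (fun acc x => acc + PySem.List.pyGetD (pvSw n i) (x - 1) 0) 0 =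
      ((s.getD q []).take (k.getD q 0).toNat).foldl
      (fun acc x => acc + (if (i >>> pvWidx n x) &&& 1 = 1 then (1 : Int) else 0)) 0 := by
    apply PySem.List.foldl_congr_mem
    intro acc x hx
    rw [pv_idx n x (pvSw n i) 0 (hxq x hx) hswlen,
      pv_sw_getD n i (pvWidx n x) (pv_widx_lt n x (hxq x hx))]
  have hsum : ((s.getD q []).take (k.getD q 0).toNat).foldl
      (fun acc x => acc + (if (i >>> pvWidx n x) &&& 1 = 1 then (1 : Int) else 0)) 0 =
      ((pvRow n k s q).countP (fun w => (i >>> w) &&& 1 == 1) : Int) := by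
    rw [PySem.List.foldl_add, zero_add]
    have : ((s.getD q []).take (k.getD q 0).toNat).map
        (fun x => if (i >>> pvWidx n x) &&& 1 = 1 then (1 : Int) else 0) =
        (pvRow n k s q).map (fun w => if ((i >>> w) &&& 1 == 1) = true then (1 : Int) else 0) := by
      unfold pvRow
      rw [List.map_map]
      apply List.map_congr_left
      intro x hx
      simp only [Function.comp_apply, beq_iff_eq]
    rw [this, PySem.List.sum_map_ite_one_zero]
  have hrowlt : ∀ w ∈ pvRow n k s q, w < n.toNat := by
    intro w hw
    unfold pvRow at hw
    obtain ⟨x, hx, hxw⟩ := List.mem_map.mp hw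
    rw [← hxw]
    exact pv_widx_lt n x (hxq x hx)
  have hgroup := pv_countP_group n.toNat (pvRow n k s q) hrowlt i
  -- right side: B's flipped parity entry
  have hrep : (List.replicate m.toNat (0 : Int)).getD q 0 = 0 := by
    rw [List.getD_eq_getElem _ _ (by simpa using hqm)]
    simp
  have hflips : pvFlips (pvTog n m k s) i q =
      (pvRow n k s q).countP (fun w => (i >>> w) &&& 1 == 1) := by
    rw [pv_flips_sum, hlen, hgroup]
    refine Finset.sum_congr rfl (fun j _ => ?_)
    rw [hcnt j q, if_pos hqm]
  have hright : (pvApply (pvTog n m k s) i (List.replicate m.toNat 0))[q]'hq2 =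
      if ((pvRow n k s q).countP (fun w => (i >>> w) &&& 1 == 1)) % 2 = 1 then (1 : Int) else 0 := by
    rw [← List.getD_eq_getElem _ 0 hq2, aval q, hrep, pv_iterate_flip, hflips]
  rw [hright]
  -- left entry computed
  have hleft : (pvBulb n m k s (pvSw n i))[q]'hq =
      PySem.Int.mod (((pvRow n k s q).countP (fun w => (i >>> w) &&& 1 == 1) : Int)) 2 := by
    unfold pvBulb
    simp only [List.getElem_map, List.getElem_range]
    rw [hfold, hsum]
  rw [hleft]
  set T := (pvRow n k s q).countP (fun w => (i >>> w) &&& 1 == 1) with hT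
  have hcast : PySem.Int.mod ((T : Nat) : Int) 2 = ((T % 2 : Nat) : Int) := by
    exact_mod_cast PySem.Int.mod_natCast T 2
  rw [hcast]
  rcases Nat.mod_two_eq_zero_or_one T with h | h <;> rw [h] <;> simp

lemma pv_alt_eq (n m : Int) (k : List Int) (s : List (List Int)) (p : List Int) :
    on_off_combination_alt n m k s p = pyOnOffGo p (pvTog n m k s) (List.replicate m.toNat 0) := rfl


-- ===== VERDICT (by name: the statement is the Claim_ definition above) =====
theorem on_off_combination_spec : Claim_equal_on_off_combination := by
  intro n m k s p _ hp
  unfold Spec_on_off_combination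
  rw [pv_A_sum n m k s p hp, pv_alt_eq]
  have hlen : (pvTog n m k s).length = n.toNat := (pv_tog_spec n m k s p hp).1
  rw [pv_go_sum, hlen]
  refine Finset.sum_congr rfl (fun i _ => ?_)
  rw [pv_bulb_eq_apply n m k s p hp i]
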